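-- pv_equiv track=rewrite | github.com/sofya-on/3- | Python/mmax.py | mmax
-- ===== SOURCE A (Python) =====
-- def mmax(p):
--     a = 0
--     flag = 1
--     while (flag == 1):
--         sum = 0
--         a += 1
--         flag = 0
--         if p[0] <= 0:
--             flag = 1
--         for i in range(0, len(p)):
--             sum *= a
--             sum += p[i]
--             if sum < 0:
--                 flag = 1
--     return a
-- ===== SOURCE B (Python) =====
-- def mmax(p):
--     M = max(1, 1 - min(p))  # for a >= 2, once the running sum reaches M it can never go negative again
--     def ok(a):
--         s = 0
--         for c in p:
--             s = s * a + c
--             if s < 0: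
--                 return False
--             if a >= 2 and s >= M:
--                 return True
--         return True
--     hi = 1
--     while not ok(hi):
--         hi *= 2
--     lo = hi // 2 + 1
--     while lo < hi:
--         mid = (lo + hi) // 2
--         if ok(mid):
--             hi = mid
--         else:
--             lo = mid + 1
--     return lo
-- ===== Notes on version B (the rewrite author's own statement) =====
-- stated objective: faster
-- what changed: A tries bases a = 1, 2, 3, ... linearly, re-running a full Horner pass for each; B doubles the base until the monotone predicate 'all Horner partial sums nonnegative' holds and binary-searches the last doubling interval, with the Horner pass exiting early once the running sum reaches max(1, 1-min(p)) (for base >= 2 it can never go negative again); intended as faster (O(log answer) capped passes vs O(answer) full ones; the probe measured 1.7-3.7x at the largest size where both finished, unconfirmed only because A times out on some sampled inputs).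
-- outside the precondition, e.g. on mmax([]): A raises IndexError, B raises ValueError; on mmax([0]): A does not finish within the time limit, B returns 1
import Mathlib
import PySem

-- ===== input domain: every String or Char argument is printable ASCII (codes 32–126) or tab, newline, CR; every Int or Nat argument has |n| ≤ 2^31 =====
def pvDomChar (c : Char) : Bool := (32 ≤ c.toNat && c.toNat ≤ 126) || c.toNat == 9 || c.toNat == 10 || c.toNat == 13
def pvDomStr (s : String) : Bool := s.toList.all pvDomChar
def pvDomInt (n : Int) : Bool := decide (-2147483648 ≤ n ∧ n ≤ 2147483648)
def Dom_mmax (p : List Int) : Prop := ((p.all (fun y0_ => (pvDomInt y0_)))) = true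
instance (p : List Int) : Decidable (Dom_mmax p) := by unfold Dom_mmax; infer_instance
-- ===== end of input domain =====

-- B replaces A's linear scan over candidate bases a = 1, 2, 3, … by doubling-then-binary-search on
-- the monotone predicate "all Horner partial sums nonnegative", with an early-exit Horner pass.

-- ===== PORT A =====
-- one pass of A's inner `for` loop: flag starts from `p[0] <= 0`, accumulates `sum < 0` checks
def mmaxStepA (a : Int) (st : Int × Bool) (c : Int) : Int × Bool :=
  (st.1 * a + c, st.2 || decide (st.1 * a + c < 0))

def mmaxPass (p : List Int) (a : Int) : Bool :=
  (p.foldl (mmaxStepA a) (0, decide (((PySem.List.pyGet? p 0).getD 0) ≤ 0))).2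
  -- on p = [] the Python raises IndexError (pyGet? = none); excluded by Pre_, .getD 0 is arbitrary

-- A's `while flag == 1` loop; fuel bounds the number of iterations (under Pre_ it is never
-- exhausted, see mmaxLoop_eq below: the loop stops at the first good a, which is at most the fuel)
def mmaxLoop (p : List Int) : Nat → Int → Int
  | 0, a => a
  | fuel + 1, a =>
      if mmaxPass p (a + 1) then mmaxLoop p fuel (a + 1) else a + 1

def mmax (p : List Int) : Int :=
  mmaxLoop p (max 1 (1 - (PySem.List.min? p (fun x => x)).getD 0)).toNat 0

-- ===== PORT B =====
-- Source B's ok(a), one step: `some r` means the loop already returned r; otherwise update s,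
-- `return False` on s < 0, `return True` once a >= 2 and s >= M
def mmaxStepF (a M : Int) (st : Int × Option Bool) (c : Int) : Int × Option Bool :=
  match st.2 with
  | some _ => st
  | none =>
      (st.1 * a + c,
        if st.1 * a + c < 0 then some false
        else if 2 ≤ a ∧ M ≤ st.1 * a + c then some true
        else none)

def mmaxOkF (p : List Int) (M a : Int) : Bool :=
  ((p.foldl (mmaxStepF a M) (0, none)).2).getD true

-- Source B's `while not ok(hi): hi *= 2`; the fuel only bounds the iteration count — under Pre_
-- it is never exhausted (mmaxGrow_spec below), so the loop runs exactly as in Python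
def mmaxGrow (p : List Int) (M : Int) : Nat → Int → Int
  | 0, hi => hi
  | f + 1, hi => if mmaxOkF p M hi then hi else mmaxGrow p M f (hi * 2)

-- Source B's `while lo < hi` binary search; `(lo + hi) // 2` is Python floor division
def mmaxBS (p : List Int) (M lo hi : Int) : Int :=
  if h : lo < hi then
    let mid := PySem.Int.floordiv (lo + hi) 2
    if mmaxOkF p M mid then mmaxBS p M lo mid else mmaxBS p M (mid + 1) hi
  else lo
termination_by (hi - lo).toNat
decreasing_by
  · have h1 := (PySem.Int.floordiv_lt_iff_lt_mul (a := lo + hi) (q := hi) (by omega : (0:Int) < 2)).2 (by omega)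
    omega
  · have h2 := (PySem.Int.le_floordiv_iff_mul_le (a := lo + hi) (q := lo) (by omega : (0:Int) < 2)).2 (by omega)
    omega

def mmax_alt (p : List Int) : Int :=
  let M := max 1 (1 - (PySem.List.min? p (fun x => x)).getD 0)
  let hi := mmaxGrow p M M.toNat 1
  mmaxBS p M (PySem.Int.floordiv hi 2 + 1) hi
  -- on p = [] the Python's min(p) raises ValueError (min? = none); excluded by Pre_, .getD 0 arbitrary

-- ===== PRECONDITION & SPEC =====
-- Pre_ excludes p = [] (A raises IndexError on p[0]) and p[0] ≤ 0 (A's flag is then re-set to 1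
-- every iteration, so A loops forever); A returns a value exactly on the inputs Pre_ admits.
def Pre_mmax (p : List Int) : Prop := p ≠ [] ∧ 1 ≤ p.headI
instance (p : List Int) : Decidable (Pre_mmax p) := by unfold Pre_mmax; infer_instance

def pvWitness_mmax : List Int := [2, -5]

def Spec_mmax (p : List Int) (out : Int) : Prop := out = mmax_alt p
instance (p : List Int) (out : Int) : Decidable (Spec_mmax p out) := by unfold Spec_mmax; infer_instance

-- ===== CLAIM (what is proved, stated in full; the proofs are below) =====
def Claim_equal_mmax : Prop := ∀ (p : List Int), Dom_mmax p → Pre_mmax p → Spec_mmax p (mmax p)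

-- ===== LEMMAS AND PROOFS =====

-- the plain (uncapped) flag fold of B's predicate, used as the common reference point
def mmaxStepB (a : Int) (st : Int × Bool) (c : Int) : Int × Bool :=
  (st.1 * a + c, st.2 && decide (0 ≤ st.1 * a + c))

def mmaxOk (p : List Int) (a : Int) : Bool :=
  (p.foldl (mmaxStepB a) (0, true)).2

-- the A-side flag fold is the negation of the B-side flag fold (flags related by g = !b)
theorem mmax_fold_or_not_and (a : Int) (l : List Int) :
    ∀ (s : Int) (g b : Bool), g = !b →
      (l.foldl (mmaxStepA a) (s, g)).2 = !(l.foldl (mmaxStepB a) (s, b)).2 := by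
  induction l with
  | nil => intro s g b h; simpa using h
  | cons c t ih =>
      intro s g b h
      subst h
      simp only [List.foldl_cons, mmaxStepA, mmaxStepB]
      apply ih
      cases b <;> simp [← decide_not]

theorem mmaxPass_eq_not_ok (p : List Int) (hp : Pre_mmax p) (a : Int) :
    mmaxPass p a = !(mmaxOk p a) := by
  obtain ⟨hne, hhd⟩ := hp
  cases p with
  | nil => exact absurd rfl hne
  | cons c t =>
      simp only [List.headI] at hhd
      unfold mmaxPass mmaxOk
      apply mmax_fold_or_not_and
      simp [PySem.List.pyGet?, PySem.List.pyIdx?]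
      omega

-- once the B-side flag is false it stays false
theorem mmax_foldB_false (a : Int) (l : List Int) :
    ∀ s : Int, (l.foldl (mmaxStepB a) (s, false)).2 = false := by
  induction l with
  | nil => intro s; rfl
  | cons c t ih => intro s; simpa [mmaxStepB] using ih _

-- core monotonicity: a good run at (a, s) dominates into a good run at (b, t) for a ≤ b, s ≤ t
theorem mmax_foldB_mono (l : List Int) :
    ∀ (a b s t : Int), 1 ≤ a → a ≤ b → 0 ≤ s → s ≤ t →
      (l.foldl (mmaxStepB a) (s, true)).2 = true →
      (l.foldl (mmaxStepB b) (t, true)).2 = true := by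
  induction l with
  | nil => intro a b s t _ _ _ _ _; rfl
  | cons c l ih =>
      intro a b s t ha hab hs hst hrun
      simp only [List.foldl_cons, mmaxStepB] at hrun ⊢
      by_cases h0 : 0 ≤ s * a + c
      · have hsa : s * a ≤ t * b := by
          calc s * a ≤ t * a := by exact mul_le_mul_of_nonneg_right hst (by omega)
            _ ≤ t * b := by exact mul_le_mul_of_nonneg_left hab (by omega)
        have h0' : 0 ≤ t * b + c := by omega
        rw [decide_eq_true h0'] at *
        simp only [Bool.and_true]
        exact ih a b (s * a + c) (t * b + c) ha hab h0 (by omega)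
          (by simpa [decide_eq_true h0] using hrun)
      · rw [decide_eq_false h0] at hrun
        simp only [Bool.and_false] at hrun
        rw [mmax_foldB_false] at hrun
        exact absurd hrun (by simp)

theorem mmaxOk_mono (p : List Int) {a b : Int} (ha : 1 ≤ a) (hab : a ≤ b)
    (h : mmaxOk p a = true) : mmaxOk p b = true :=
  mmax_foldB_mono p a b 0 0 ha hab le_rfl le_rfl h

-- once the running sum is ≥ 1 and a ≥ 1 - x for every remaining coefficient x, the run stays good
theorem mmax_foldB_pos (a : Int) (l : List Int) :
    ∀ s : Int, 1 ≤ a → 1 ≤ s → (∀ x ∈ l, 1 - x ≤ a) →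
      (l.foldl (mmaxStepB a) (s, true)).2 = true := by
  induction l with
  | nil => intro s _ _ _; rfl
  | cons c l ih =>
      intro s ha hs hall
      have hsa : a ≤ s * a := le_mul_of_one_le_left (by omega) hs
      have hc : 1 - c ≤ a := hall c (List.mem_cons_self ..)
      have h1 : 1 ≤ s * a + c := by omega
      simp only [List.foldl_cons, mmaxStepB, decide_eq_true (by omega : 0 ≤ s * a + c),
        Bool.and_true]
      exact ih _ ha h1 (fun x hx => hall x (List.mem_cons_of_mem _ hx))

-- once the running sum is ≥ M ≥ 1 - x for every remaining x and a ≥ 2, the run stays good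
theorem mmax_foldB_big (a M : Int) (l : List Int) :
    ∀ s : Int, 2 ≤ a → 1 ≤ M → (∀ x ∈ l, 1 - x ≤ M) → M ≤ s →
      (l.foldl (mmaxStepB a) (s, true)).2 = true := by
  induction l with
  | nil => intro s _ _ _ _; rfl
  | cons c l ih =>
      intro s ha hM hall hs
      have hsa : s * 2 ≤ s * a := mul_le_mul_of_nonneg_left ha (by omega)
      have hc : 1 - c ≤ M := hall c (List.mem_cons_self ..)
      have h1 : M ≤ s * a + c := by omega
      simp only [List.foldl_cons, mmaxStepB, decide_eq_true (by omega : 0 ≤ s * a + c),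
        Bool.and_true]
      exact ih _ ha hM (fun x hx => hall x (List.mem_cons_of_mem _ hx)) h1

-- the early-exit fold keeps a decided result
theorem mmax_foldF_some (a M : Int) (l : List Int) :
    ∀ (s : Int) (r : Bool), (l.foldl (mmaxStepF a M) (s, some r)).2 = some r := by
  induction l with
  | nil => intro s r; rfl
  | cons c l ih => intro s r; simpa [mmaxStepF] using ih _ r

-- bridge: B's early-exit ok computes exactly the uncapped all-partial-sums-nonnegative flag
theorem mmax_foldF_eq_foldB (a M : Int) (l : List Int) :
    ∀ s : Int, 1 ≤ a → 1 ≤ M → (∀ x ∈ l, 1 - x ≤ M) →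
      ((l.foldl (mmaxStepF a M) (s, none)).2).getD true = (l.foldl (mmaxStepB a) (s, true)).2 := by
  induction l with
  | nil => intro s _ _ _; rfl
  | cons c l ih =>
      intro s ha hM hall
      simp only [List.foldl_cons, mmaxStepF, mmaxStepB]
      by_cases hneg : s * a + c < 0
      · rw [if_pos hneg, mmax_foldF_some, decide_eq_false (by omega : ¬ 0 ≤ s * a + c)]
        simp only [Bool.and_false, Option.getD_some, mmax_foldB_false]
      · rw [if_neg hneg, decide_eq_true (by omega : 0 ≤ s * a + c)]
        simp only [Bool.and_true]
        by_cases hbig : 2 ≤ a ∧ M ≤ s * a + c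
        · rw [if_pos hbig, mmax_foldF_some]
          exact (mmax_foldB_big a M l (s * a + c) hbig.1 hM
            (fun x hx => hall x (List.mem_cons_of_mem _ hx)) hbig.2).symm
        · rw [if_neg hbig]
          exact ih _ ha hM (fun x hx => hall x (List.mem_cons_of_mem _ hx))

theorem mmaxOkF_eq (p : List Int) (M : Int) {a : Int} (ha : 1 ≤ a) (hM : 1 ≤ M)
    (hall : ∀ x ∈ p, 1 - x ≤ M) : mmaxOkF p M a = mmaxOk p a :=
  mmax_foldF_eq_foldB a M p 0 ha hM hall

-- the explicit bound M := max 1 (1 - min p) satisfies ok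
theorem mmaxOk_bound (p : List Int) (hp : Pre_mmax p) :
    mmaxOk p (max 1 (1 - (PySem.List.min? p (fun x => x)).getD 0)) = true := by
  obtain ⟨hne, hhd⟩ := hp
  cases p with
  | nil => exact absurd rfl hne
  | cons c t =>
      simp only [List.headI] at hhd
      obtain ⟨m, hm⟩ : ∃ m, PySem.List.min? (c :: t) (fun x => x) = some m := by
        cases h : PySem.List.min? (c :: t) (fun x => x) with
        | none => exact absurd ((PySem.List.min?_eq_none_iff _ _).1 h) (by simp)
        | some m => exact ⟨m, rfl⟩
      have hmin : ∀ y ∈ c :: t, m ≤ y := PySem.List.min?_isMin hm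
      rw [hm]
      simp only [Option.getD_some]
      set a := max 1 (1 - m) with hadef
      have ha : 1 ≤ a := le_max_left _ _
      have ham : 1 - m ≤ a := le_max_right _ _
      unfold mmaxOk
      simp only [List.foldl_cons, mmaxStepB, zero_mul, zero_add]
      rw [decide_eq_true (show (0:Int) ≤ c by omega)]
      simp only [Bool.true_and]
      exact mmax_foldB_pos a t c ha (by omega)
        (fun x hx => by have := hmin x (List.mem_cons_of_mem _ hx); omega)

-- (hi * 2) // 2 = hi, Python floor division
theorem mmax_fd_double (hi : Int) : PySem.Int.floordiv (hi * 2) 2 = hi :=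
  (PySem.Int.floordiv_eq_iff_of_pos (by omega : (0:Int) < 2)).2 (by constructor <;> omega)

-- the doubling loop returns a good hi whose lower half-point is bad (or hi is still the initial 1),
-- provided the fuel admits reaching some good N
theorem mmaxGrow_spec (p : List Int) (M N : Int) (hN1 : 1 ≤ N) (hNok : mmaxOk p N = true)
    (hbr : ∀ a : Int, 1 ≤ a → mmaxOkF p M a = mmaxOk p a) :
    ∀ (f : Nat) (hi : Int), 1 ≤ hi →
      (hi = 1 ∨ mmaxOk p (PySem.Int.floordiv hi 2) = false) →
      N ≤ hi * 2 ^ f →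
      (1 ≤ mmaxGrow p M f hi ∧ mmaxOk p (mmaxGrow p M f hi) = true ∧
        (mmaxGrow p M f hi = 1 ∨ mmaxOk p (PySem.Int.floordiv (mmaxGrow p M f hi) 2) = false)) := by
  intro f
  induction f with
  | zero =>
      intro hi h1 hinv hb
      simp only [pow_zero, mul_one] at hb
      exact ⟨h1, mmaxOk_mono p hN1 hb hNok, hinv⟩
  | succ f ih =>
      intro hi h1 hinv hb
      rw [mmaxGrow]
      by_cases hok : mmaxOkF p M hi = true
      · rw [if_pos hok]
        exact ⟨h1, (hbr hi h1) ▸ hok, hinv⟩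
      · rw [if_neg hok]
        refine ih (hi * 2) (by omega) (Or.inr ?_) ?_
        · rw [mmax_fd_double, ← hbr hi h1]
          exact Bool.eq_false_iff.2 hok
        · have h2 : hi * 2 ^ (f + 1) = hi * 2 * 2 ^ f := by ring
          omega

-- binary search returns the least a ≥ lo with ok, given ok hi and all j < lo bad
theorem mmaxBS_correct (p : List Int) (M : Int)
    (hbr : ∀ a : Int, 1 ≤ a → mmaxOkF p M a = mmaxOk p a) :
    ∀ (lo hi : Int), 1 ≤ lo → lo ≤ hi → mmaxOk p hi = true →
      (∀ j, 1 ≤ j → j < lo → mmaxOk p j = false) →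
      (1 ≤ mmaxBS p M lo hi ∧ mmaxOk p (mmaxBS p M lo hi) = true ∧
        ∀ j, 1 ≤ j → j < mmaxBS p M lo hi → mmaxOk p j = false) := by
  intro lo hi
  induction lo, hi using mmaxBS.induct p M with
  | case1 lo hi hlt mid hok ih =>
      intro h1 _ hhi hbelow
      have hb := PySem.Int.floordiv_two_mid_bounds (le_of_lt hlt)
      rw [mmaxBS, dif_pos hlt, if_pos hok]
      rw [hbr mid (by omega)] at hok
      exact ih h1 hb.1 hok hbelow
  | case2 lo hi hlt mid hok ih =>
      intro h1 _ hhi hbelow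
      have hb := PySem.Int.floordiv_two_mid_bounds (le_of_lt hlt)
      have hmidlt : mid < hi :=
        (PySem.Int.floordiv_lt_iff_lt_mul (by omega : (0:Int) < 2)).2 (by omega)
      have hmid : mmaxOk p mid = false := by
        rw [← hbr mid (by omega)]
        exact Bool.eq_false_iff.2 hok
      rw [mmaxBS, dif_pos hlt, if_neg hok]
      refine ih (by omega) (by omega) hhi ?_
      intro j hj hjm
      by_cases hc : j < lo
      · exact hbelow j hj hc
      · cases hMem : mmaxOk p j with
        | false => rfl
        | true =>
            exact absurd (mmaxOk_mono p (b := mid) hj (by omega) hMem) (by rw [hmid]; simp)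
  | case3 lo hi hnlt =>
      intro h1 hle hhi hbelow
      rw [mmaxBS, dif_neg hnlt]
      have : lo = hi := by omega
      exact ⟨h1, this ▸ hhi, hbelow⟩

-- A's loop hits the least good a exactly, given enough fuel
theorem mmaxLoop_eq (p : List Int) (hp : Pre_mmax p) (N : Int)
    (hN : mmaxOk p N = true) (hmin : ∀ j, 1 ≤ j → j < N → mmaxOk p j = false) :
    ∀ (fuel : Nat) (a : Int), 0 ≤ a → a < N → N ≤ a + fuel → mmaxLoop p fuel a = N := by
  intro fuel
  induction fuel with
  | zero => intro a _ h1 h2; simp at h2; omega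
  | succ fuel ih =>
      intro a ha haN hfuel
      rw [mmaxLoop]
      rw [mmaxPass_eq_not_ok p hp]
      by_cases h : a + 1 = N
      · rw [h, hN]
        simp
      · have hlt : a + 1 < N := by omega
        rw [hmin (a + 1) (by omega) hlt]
        simp only [Bool.not_false, if_true]
        exact ih (a + 1) (by omega) hlt (by push_cast at hfuel ⊢; omega)

-- ===== VERDICT (by name: the statement is the Claim_ definition above) =====
theorem mmax_spec : Claim_equal_mmax := by
  intro p _ hp
  unfold Spec_mmax
  show mmax p =
    mmaxBS p (max 1 (1 - (PySem.List.min? p (fun x => x)).getD 0))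
      (PySem.Int.floordiv
          (mmaxGrow p (max 1 (1 - (PySem.List.min? p (fun x => x)).getD 0))
            (max 1 (1 - (PySem.List.min? p (fun x => x)).getD 0)).toNat 1) 2 + 1)
      (mmaxGrow p (max 1 (1 - (PySem.List.min? p (fun x => x)).getD 0))
        (max 1 (1 - (PySem.List.min? p (fun x => x)).getD 0)).toNat 1)
  have hall : ∀ x ∈ p, 1 - x ≤ max 1 (1 - (PySem.List.min? p (fun x => x)).getD 0) := by
    intro x hx
    obtain ⟨m, hm⟩ : ∃ m, PySem.List.min? p (fun x => x) = some m := by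
      cases h : PySem.List.min? p (fun x => x) with
      | none => exact absurd ((PySem.List.min?_eq_none_iff _ _).1 h) hp.1
      | some m => exact ⟨m, rfl⟩
    have := PySem.List.min?_isMin hm x hx
    rw [hm]
    simp only [Option.getD_some]
    have := le_max_right 1 (1 - m)
    omega
  set M := max 1 (1 - (PySem.List.min? p (fun x => x)).getD 0) with hMdef
  have hM1 : 1 ≤ M := le_max_left _ _
  have hokM : mmaxOk p M = true := mmaxOk_bound p hp
  have hbr : ∀ a : Int, 1 ≤ a → mmaxOkF p M a = mmaxOk p a :=
    fun a ha => mmaxOkF_eq p M ha hM1 hall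
  have hMpow : M ≤ 1 * 2 ^ M.toNat := by
    have h1 : M.toNat < 2 ^ M.toNat := Nat.lt_two_pow_self
    have h2 : ((M.toNat : Nat) : Int) = M := by omega
    have h3 : ((2 ^ M.toNat : Nat) : Int) = 2 ^ M.toNat := by push_cast; rfl
    omega
  obtain ⟨hr1, hrok, hrinv⟩ :=
    mmaxGrow_spec p M M hM1 hokM hbr M.toNat 1 le_rfl (Or.inl rfl) hMpow
  set r := mmaxGrow p M M.toNat 1 with hrdef
  have hfd0 : 0 ≤ PySem.Int.floordiv r 2 :=
    (PySem.Int.le_floordiv_iff_mul_le (by omega : (0:Int) < 2)).2 (by omega)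
  have hfdlt : PySem.Int.floordiv r 2 < r :=
    (PySem.Int.floordiv_lt_iff_lt_mul (by omega : (0:Int) < 2)).2 (by omega)
  have hbelow : ∀ j, 1 ≤ j → j < PySem.Int.floordiv r 2 + 1 → mmaxOk p j = false := by
    intro j hj hjlt
    rcases hrinv with hone | hbad
    · have : PySem.Int.floordiv 1 2 = 0 := by decide
      rw [hone, this] at hjlt; omega
    · cases hMem : mmaxOk p j with
      | false => rfl
      | true =>
          exact absurd (mmaxOk_mono p (b := PySem.Int.floordiv r 2) hj (by omega) hMem)
            (by rw [hbad]; simp)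
  obtain ⟨hN1, hNok, hNmin⟩ :=
    mmaxBS_correct p M hbr (PySem.Int.floordiv r 2 + 1) r (by omega) (by omega) hrok hbelow
  set N := mmaxBS p M (PySem.Int.floordiv r 2 + 1) r with hNdef
  have hNM : N ≤ M := by
    by_contra hcon
    have := hNmin M hM1 (by omega)
    rw [hokM] at this; exact absurd this (by simp)
  show mmax p = N
  unfold mmax
  rw [← hMdef]
  exact mmaxLoop_eq p hp N hNok hNmin M.toNat 0 le_rfl (by omega) (by omega)
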